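-- pv_equiv track=rewrite | github.com/RollNDuck/CS11 | worderly.py | valid_subword
-- ===== SOURCE A (Python) =====
-- def valid_subword(word, main_word):
--     """Check if a word is a valid subword of the main word"""
--     main_word = main_word.lower()
--     if word == main_word:
--         return False
--     for letter in word:
--         if word.count(letter) > main_word.count(letter):
--             return False
--     return True
-- ===== SOURCE B (Python) =====
-- def valid_subword(word, main_word):
--     """Check if a word is a valid subword of the main word"""
--     main_word = main_word.lower()
--     if word == main_word:
--         return False
--     sw = sorted(word)
--     sm = sorted(main_word)
--     j = 0
--     n = len(sm)
--     for c in sw: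
--         while j < n and sm[j] < c:
--             j += 1
--         if j == n or sm[j] != c:
--             return False
--         j += 1
--     return True
-- ===== Notes on version B (the rewrite author's own statement) =====
-- stated objective: alternative
-- what changed: Replaces A's per-letter repeated .count scans of both strings with sorting both letter lists once and a single two-pointer merge pass that consumes matched letters.
import Mathlib
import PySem

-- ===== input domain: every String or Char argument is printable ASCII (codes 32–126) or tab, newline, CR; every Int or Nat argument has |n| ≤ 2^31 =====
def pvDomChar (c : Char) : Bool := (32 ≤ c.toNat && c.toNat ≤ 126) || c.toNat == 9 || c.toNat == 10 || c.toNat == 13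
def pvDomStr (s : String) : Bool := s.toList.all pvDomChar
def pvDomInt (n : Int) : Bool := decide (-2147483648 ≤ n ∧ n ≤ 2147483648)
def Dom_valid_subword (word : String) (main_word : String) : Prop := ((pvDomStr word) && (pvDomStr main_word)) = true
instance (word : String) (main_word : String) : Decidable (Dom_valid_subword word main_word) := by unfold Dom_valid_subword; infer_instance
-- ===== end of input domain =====

-- B replaces A's repeated .count scans with sort-then-merge two-pointer pass (alternative decomposition, same observable behaviour).


-- ===== PORT A =====
-- the 'for letter in word' loop with its early return False
def validSubwordLoopA (word main : String) : List Char → Bool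
  | [] => true
  | letter :: rest =>
      if PySem.Str.count word (String.singleton letter) > PySem.Str.count main (String.singleton letter) then
        false
      else validSubwordLoopA word main rest

def valid_subword (word : String) (main_word : String) : Bool :=
  let main := PySem.Str.lower main_word
  if word == main then false
  else validSubwordLoopA word main word.toList

-- ===== PORT B =====
-- the merge pass: for each c in sw, advance j past letters < c (the remaining
-- suffix of sm stands for the pointer j), demand the next letter equals c, consume it
def validSubwordMergeB : List Char → List Char → Bool
  | [], _ => true
  | c :: cs, sm =>
      match sm.dropWhile (fun d => d < c) with
      | [] => false
      | d :: ds => if d ≠ c then false else validSubwordMergeB cs ds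

def valid_subword_alt (word : String) (main_word : String) : Bool :=
  let main := PySem.Str.lower main_word
  if word == main then false
  else
    validSubwordMergeB (PySem.List.sorted word.toList (fun x => x))
      (PySem.List.sorted main.toList (fun x => x))

-- ===== PRECONDITION & SPEC =====
def Spec_valid_subword (word : String) (main_word : String) (out : Bool) : Prop := out = valid_subword_alt word main_word
instance (word : String) (main_word : String) (out : Bool) : Decidable (Spec_valid_subword word main_word out) := by unfold Spec_valid_subword; infer_instance

-- ===== CLAIM (what is proved, stated in full; the proofs are below) =====
def Claim_equal_valid_subword : Prop := ∀ (word : String) (main_word : String), Dom_valid_subword word main_word → Spec_valid_subword word main_word (valid_subword word main_word)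

-- ===== LEMMAS AND PROOFS =====

-- Python str.count of a single character equals List.count
theorem charsCount_go_singleton (c : Char) :
    ∀ (s : List Char) (fuel acc : Nat), s.length ≤ fuel →
      PySem.Chars.count.go [c] fuel s acc = acc + s.count c := by
  intro s
  induction s with
  | nil => intro fuel acc _; cases fuel <;> simp [PySem.Chars.count.go]
  | cons h t ih =>
      intro fuel acc hf
      cases fuel with
      | zero => simp at hf
      | succ n =>
          have hf' : t.length ≤ n := by simpa using hf
          by_cases hc : c = h
          · subst hc
            have hpre : [c].isPrefixOf (c :: t) = true := by simp [List.isPrefixOf]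
            simp only [PySem.Chars.count.go, hpre, if_true, List.length_cons, List.drop_succ_cons,
              List.length_nil, List.drop_zero]
            rw [ih n (acc + 1) hf', List.count_cons_self]
            omega
          · have hpre : [c].isPrefixOf (h :: t) = false := by simp [List.isPrefixOf, hc]
            simp only [PySem.Chars.count.go, hpre, if_false, Bool.false_eq_true]
            rw [ih n acc hf']
            simp [Ne.symm hc]

theorem charsCount_singleton (s : List Char) (c : Char) :
    PySem.Chars.count s [c] = s.count c := by
  simpa using charsCount_go_singleton c s s.length 0 le_rfl

theorem strCount_singleton (s : String) (c : Char) :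
    PySem.Str.count s (String.singleton c) = s.toList.count c := by
  rw [PySem.Str.count_eq]
  simpa using charsCount_singleton s.toList c

-- A's loop decides the count condition over the remaining letters
theorem loopA_eq (word main : String) (l : List Char) :
    validSubwordLoopA word main l =
      decide (∀ c ∈ l, word.toList.count c ≤ main.toList.count c) := by
  induction l with
  | nil => simp [validSubwordLoopA]
  | cons h t ih =>
      simp only [validSubwordLoopA, strCount_singleton, ih]
      by_cases hc : main.toList.count h < word.toList.count h
      · simp [hc]
      · simp [hc]
        intro _; omega

-- the head of a dropWhile result falsifies the predicate
theorem dropWhileHeadFalse {p : Char → Bool} {l : List Char} {d : Char} {ds : List Char}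
    (h : l.dropWhile p = d :: ds) : p d = false := by
  induction l with
  | nil => simp [List.dropWhile] at h
  | cons a t ih =>
      by_cases hp : p a
      · rw [List.dropWhile_cons_of_pos hp] at h; exact ih h
      · rw [List.dropWhile_cons_of_neg hp] at h
        cases h; simpa using hp

-- merge returns true iff the first sorted list is a sub-multiset of the second
theorem mergeB_true_of_subperm :
    ∀ (sw sm : List Char), sw.Pairwise (· ≤ ·) → sm.Pairwise (· ≤ ·) →
      sw.Subperm sm → validSubwordMergeB sw sm = true := by
  intro sw
  induction sw with
  | nil => intro sm _ _ _; simp [validSubwordMergeB]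
  | cons c cs ih =>
      intro sm hsw hsm hsub
      have hmem : c ∈ sm := hsub.subset (List.mem_cons_self ..)
      -- split sm at the dropWhile point
      have hsplit : sm.takeWhile (fun d => decide (d < c)) ++ sm.dropWhile (fun d => decide (d < c)) = sm :=
        List.takeWhile_append_dropWhile
      have htake : ∀ x ∈ sm.takeWhile (fun d => decide (d < c)), x < c := by
        intro x hx
        have := List.mem_takeWhile_imp hx
        simpa using this
      have hne : sm.dropWhile (fun d => decide (d < c)) ≠ [] := by
        intro hnil
        have h2 := hsplit
        rw [hnil, List.append_nil] at h2
        exact lt_irrefl c (htake c (by rw [h2]; exact hmem))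
      obtain ⟨d, ds, hds⟩ := List.exists_cons_of_ne_nil hne
      have hdge : ¬ d < c := by
        have h3 := dropWhileHeadFalse hds
        simpa using h3
      -- d = c since c occurs in d :: ds and the list is sorted
      have hsm' : sm = sm.takeWhile (fun d => decide (d < c)) ++ d :: ds := by
        conv_lhs => rw [← hsplit]
        rw [hds]
      have hcmem : c ∈ d :: ds := by
        rcases List.mem_append.mp (hsm' ▸ hmem) with h | h
        · exact absurd (htake c h) (lt_irrefl c)
        · exact h
      have hsorted_dds : (d :: ds).Pairwise (· ≤ ·) := by
        have : (sm.dropWhile (fun d => decide (d < c))).Pairwise (· ≤ ·) :=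
          hsm.sublist ((List.dropWhile_suffix _).sublist)
        simpa [hds] using this
      have hdc : d = c := by
        rcases List.mem_cons.mp hcmem with h | h
        · exact h.symm
        · have : d ≤ c := (List.pairwise_cons.mp hsorted_dds).1 c h
          exact le_antisymm this (not_lt.mp hdge)
      subst hdc
      -- counts: cs is a sub-multiset of ds
      have hcsle : ∀ x ∈ cs, cs.count x ≤ ds.count x := by
        intro x hx
        have hxge : d ≤ x := (List.pairwise_cons.mp hsw).1 x hx
        have h1 : (d :: cs).count x ≤ sm.count x := List.subperm_ext_iff.mp hsub x (List.mem_cons_of_mem _ hx)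
        have h0 : (sm.takeWhile (fun e => decide (e < d))).count x = 0 := by
          rw [List.count_eq_zero]
          intro hmemx
          exact absurd (lt_of_lt_of_le (htake x hmemx) hxge) (lt_irrefl x)
        rw [hsm', List.count_append, h0, List.count_cons, List.count_cons] at h1
        by_cases hxd : x = d
        · subst hxd; simp at h1; omega
        · simp [Ne.symm hxd] at h1
          omega
      have hsub' : cs.Subperm ds := List.subperm_ext_iff.mpr hcsle
      have := ih ds (List.pairwise_cons.mp hsw).2 (List.pairwise_cons.mp hsorted_dds).2 hsub'
      simp [validSubwordMergeB, hds, this]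

theorem mergeB_subperm_of_true :
    ∀ (sw sm : List Char), validSubwordMergeB sw sm = true → sw.Subperm sm := by
  intro sw
  induction sw with
  | nil => intro sm _; exact List.nil_subperm
  | cons c cs ih =>
      intro sm hm
      unfold validSubwordMergeB at hm
      rcases hds : sm.dropWhile (fun d => d < c) with _ | ⟨d, ds⟩
      · rw [hds] at hm; simp at hm
      · rw [hds] at hm
        by_cases hdc : d = c
        · subst hdc
          simp at hm
          have h1 : cs.Subperm ds := ih ds hm
          have h2 : (d :: cs).Subperm (d :: ds) := (List.subperm_cons d).mpr h1
          have h3 : (d :: ds).Sublist sm := by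
            have : (d :: ds) <:+ sm := hds ▸ List.dropWhile_suffix _
            exact this.sublist
          exact h2.trans h3.subperm
        · simp [hdc] at hm

theorem mergeB_iff (sw sm : List Char) (hsw : sw.Pairwise (· ≤ ·)) (hsm : sm.Pairwise (· ≤ ·)) :
    validSubwordMergeB sw sm = true ↔ sw.Subperm sm :=
  ⟨mergeB_subperm_of_true sw sm, mergeB_true_of_subperm sw sm hsw hsm⟩

-- the two else-branches agree
theorem branches_eq (word main : String) :
    validSubwordLoopA word main word.toList =
      validSubwordMergeB (PySem.List.sorted word.toList (fun x => x))
        (PySem.List.sorted main.toList (fun x => x)) := by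
  have hsw := PySem.List.sorted_pairwise word.toList (fun x => x)
  have hsm := PySem.List.sorted_pairwise main.toList (fun x => x)
  have hiff := mergeB_iff _ _ hsw hsm
  have hpw : (PySem.List.sorted word.toList (fun x => x)).Perm word.toList :=
    PySem.List.sorted_perm _ _ _
  have hpm : (PySem.List.sorted main.toList (fun x => x)).Perm main.toList :=
    PySem.List.sorted_perm _ _ _
  have hsubiff : (PySem.List.sorted word.toList (fun x => x)).Subperm
      (PySem.List.sorted main.toList (fun x => x)) ↔ word.toList.Subperm main.toList := by
    rw [hpm.subperm_left, hpw.subperm_right]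
  rw [loopA_eq]
  by_cases h : word.toList.Subperm main.toList
  · have h1 : validSubwordMergeB (PySem.List.sorted word.toList (fun x => x))
        (PySem.List.sorted main.toList (fun x => x)) = true := hiff.mpr (hsubiff.mpr h)
    rw [h1]
    simp only [decide_eq_true_iff]
    exact fun c hc => List.subperm_ext_iff.mp h c hc
  · have h1 : validSubwordMergeB (PySem.List.sorted word.toList (fun x => x))
        (PySem.List.sorted main.toList (fun x => x)) = false := by
      rcases hb : validSubwordMergeB (PySem.List.sorted word.toList (fun x => x))
        (PySem.List.sorted main.toList (fun x => x)) with _ | _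
      · rfl
      · exact absurd (hsubiff.mp (hiff.mp hb)) h
    rw [h1]
    simp only [decide_eq_false_iff_not]
    intro hall
    exact h (List.subperm_ext_iff.mpr hall)

-- ===== VERDICT (by name: the statement is the Claim_ definition above) =====
theorem valid_subword_spec : Claim_equal_valid_subword := by
  intro word main_word _
  unfold Spec_valid_subword valid_subword valid_subword_alt
  by_cases h : word == PySem.Str.lower main_word
  · simp [h]
  · simp only [h, if_false, Bool.false_eq_true]
    exact branches_eq word (PySem.Str.lower main_word)
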